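-- pv_equiv track=rewrite | github.com/Roktar/codewars | lang/python/C%/check_three_and_two.py | check_three_and_two
-- ===== SOURCE A (Python) =====
-- def check_three_and_two(array):
--     # freq = [0] * 26
--
--     # for i in range(len(array)) :
--     #     freq[ ord(array[i]) - 97 ] += 1
--
--     # max, min = (0, 0)
--
--     # for i in range(len(array)) :
--     #     if freq[ ord(array[i]) - 97 ] == 3 :
--     #         max = 3
--     #     elif freq[ ord(array[i]) - 97 ] == 2 :
--     #         min = 2
--
--     max, min = (False, False)
--
--     for n in array :
--         if array.count(n) == 3 :
--             max = True
--         elif array.count(n) == 2 :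
--             min = True
--
--     return True if max and min else False
-- ===== SOURCE B (Python) =====
-- def check_three_and_two(array):
--     s = sorted(array)
--     has3 = has2 = False
--     i = 0
--     while i < len(s):
--         j = i
--         while j < len(s) and s[j] == s[i]:
--             j += 1
--         run = j - i
--         if run == 3:
--             has3 = True
--         if run == 2:
--             has2 = True
--         i = j
--     return has3 and has2
-- ===== Notes on version B (the rewrite author's own statement) =====
-- stated objective: faster
-- what changed: Replaced the quadratic loop that calls array.count(n) for every element by sorting once and scanning consecutive equal runs, flagging run lengths 3 and 2.
import Mathlib
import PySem

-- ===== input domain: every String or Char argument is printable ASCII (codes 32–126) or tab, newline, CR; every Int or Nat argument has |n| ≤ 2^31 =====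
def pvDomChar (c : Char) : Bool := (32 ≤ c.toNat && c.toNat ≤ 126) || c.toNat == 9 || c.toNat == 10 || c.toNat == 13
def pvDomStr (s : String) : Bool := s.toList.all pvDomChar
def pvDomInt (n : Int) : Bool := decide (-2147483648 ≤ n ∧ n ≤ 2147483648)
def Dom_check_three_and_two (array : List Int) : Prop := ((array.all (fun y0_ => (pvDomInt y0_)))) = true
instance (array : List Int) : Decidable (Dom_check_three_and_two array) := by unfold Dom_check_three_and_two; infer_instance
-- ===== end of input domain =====

-- B sorts once and scans consecutive equal runs (O(n log n)) instead of A's per-element array.count scan (O(n^2)).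
-- ===== PORT A =====
def check_three_and_two (array : List Int) : Bool :=
  -- for n in array: if array.count(n) == 3: max = True; elif array.count(n) == 2: min = True
  let st := array.foldl (fun (p : Bool × Bool) n =>
    if PySem.List.count array n = 3 then (true, p.2)
    else if PySem.List.count array n = 2 then (p.1, true)
    else p) (false, false)
  if st.1 && st.2 then true else false

-- ===== PORT B =====
-- the inner `while s[j] == s[i]` run scan of Source B: one step consumes the run of the head element
def runScan : List Int → Bool → Bool → Bool
  | [], has3, has2 => has3 && has2
  | x :: rest, has3, has2 =>
    let run := (rest.takeWhile (· == x)).length + 1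
    runScan (rest.dropWhile (· == x)) (has3 || run == 3) (has2 || run == 2)
termination_by s _ _ => s.length
decreasing_by
  simp only [List.length_cons]
  exact Nat.lt_succ_of_le (List.length_dropWhile_le _ _)

def check_three_and_two_alt (array : List Int) : Bool :=
  runScan (PySem.List.sorted array (fun x => x) false) false false

-- ===== PRECONDITION & SPEC =====
def Spec_check_three_and_two (array : List Int) (out : Bool) : Prop := out = check_three_and_two_alt array
instance (array : List Int) (out : Bool) : Decidable (Spec_check_three_and_two array out) := by unfold Spec_check_three_and_two; infer_instance

-- ===== CLAIM (what is proved, stated in full; the proofs are below) =====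
def Claim_equal_check_three_and_two : Prop := ∀ (array : List Int), Dom_check_three_and_two array → Spec_check_three_and_two array (check_three_and_two array)

-- ===== LEMMAS AND PROOFS =====

-- ===== VERDICT (by name: the statement is the Claim_ definition above) =====
-- A's fold over (max, min): accumulates "some element has count 3" / "count 2 (elif: and not 3)"
theorem foldA (array l : List Int) (a b : Bool) :
    l.foldl (fun (p : Bool × Bool) n =>
      if PySem.List.count array n = 3 then (true, p.2)
      else if PySem.List.count array n = 2 then (p.1, true)
      else p) (a, b)
    = (a || l.any (fun n => PySem.List.count array n == 3),
       b || l.any (fun n => !(PySem.List.count array n == 3) && PySem.List.count array n == 2)) := by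
  induction l generalizing a b with
  | nil => simp
  | cons x t ih =>
    simp only [List.foldl_cons, List.any_cons, PySem.List.count] at *
    split_ifs with h1 h2
    · rw [ih]; simp [h1]
    · rw [ih]; simp [h2]
    · have e3 : (List.count x array == 3) = false := by simp [h1]
      have e2 : (List.count x array == 2) = false := by simp [h2]
      rw [ih]; simp [e3, e2]

-- in a sorted list, everything after the leading run of the head is strictly greater than the head
theorem gt_of_mem_dropWhile {x : Int} {rest : List Int}
    (hpw : rest.Pairwise (· ≤ ·)) (hle : ∀ y ∈ rest, x ≤ y) :
    ∀ y ∈ rest.dropWhile (· == x), x < y := by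
  cases hd : rest.dropWhile (· == x) with
  | nil => simp
  | cons z d' =>
    have hzne : ((· == x) z) = false := by
      have h := List.head_dropWhile_not (· == x) (l := rest) (by simp [hd])
      simpa [hd] using h
    have hsub : (z :: d').Sublist rest := hd ▸ List.dropWhile_sublist (· == x)
    have hzmem : z ∈ rest := hsub.mem (by simp)
    have hxz : x < z := lt_of_le_of_ne (hle z hzmem) (by simp at hzne; omega)
    have hpw' : (z :: d').Pairwise (· ≤ ·) := hpw.sublist hsub
    intro y hy
    rcases List.mem_cons.mp hy with rfl | hy'
    · exact hxz
    · exact lt_of_lt_of_le hxz ((List.pairwise_cons.mp hpw').1 y hy')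

-- on a sorted list, "some element of the list has count k" splits into
-- "the head's run has length k, or some element after the run has count k in the remainder"
theorem any_count_split (x : Int) (rest : List Int)
    (hs : (x :: rest).Pairwise (· ≤ ·)) (k : Nat) :
    (x :: rest).any (fun y => (x :: rest).count y == k)
    = (((rest.takeWhile (· == x)).length + 1 == k)
       || (rest.dropWhile (· == x)).any
            (fun y => (rest.dropWhile (· == x)).count y == k)) := by
  obtain ⟨hle, hpw⟩ := List.pairwise_cons.mp hs
  have hdgt : ∀ y ∈ rest.dropWhile (· == x), x < y := gt_of_mem_dropWhile hpw hle
  have htx : ∀ y ∈ rest.takeWhile (· == x), y = x := fun y hy => by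
    simpa using List.mem_takeWhile_imp hy
  have hrest : rest.takeWhile (· == x) ++ rest.dropWhile (· == x) = rest :=
    List.takeWhile_append_dropWhile
  have hsplit : ∀ y : Int, rest.count y
      = (rest.takeWhile (· == x)).count y + (rest.dropWhile (· == x)).count y := by
    intro y
    conv_lhs => rw [← hrest]
    rw [List.count_append]
  have hcx : (x :: rest).count x = (rest.takeWhile (· == x)).length + 1 := by
    have h1 : (rest.takeWhile (· == x)).count x = (rest.takeWhile (· == x)).length :=
      List.count_eq_length.mpr (fun b hb => (htx b hb).symm)
    have h2 : (rest.dropWhile (· == x)).count x = 0 :=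
      List.count_eq_zero.mpr (fun hm => lt_irrefl x (hdgt x hm))
    rw [List.count_cons_self, hsplit x, h1, h2]
  have hcd : ∀ y ∈ rest.dropWhile (· == x),
      (x :: rest).count y = (rest.dropWhile (· == x)).count y := by
    intro y hy
    have hyx : y ≠ x := fun h => lt_irrefl x (h ▸ hdgt y hy)
    have h1 : (rest.takeWhile (· == x)).count y = 0 :=
      List.count_eq_zero.mpr (fun hm => hyx (htx y hm))
    rw [List.count_cons, hsplit y, h1]
    simp [Ne.symm hyx]
  rw [Bool.eq_iff_iff]
  simp only [List.any_eq_true, List.mem_cons, beq_iff_eq, Bool.or_eq_true]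
  constructor
  · rintro ⟨y, (rfl | hy), hc⟩
    · left; rw [hcx] at hc; exact hc
    · rw [← hrest] at hy
      rcases List.mem_append.mp hy with hyt | hyd
      · left; rw [htx y hyt, hcx] at hc; exact hc
      · right; exact ⟨y, hyd, by rw [← hcd y hyd]; exact hc⟩
  · rintro (hk | ⟨y, hy, hc⟩)
    · exact ⟨x, Or.inl rfl, by rw [hcx]; exact hk⟩
    · refine ⟨y, Or.inr ?_, by rw [hcd y hy]; exact hc⟩
      rw [← hrest]; exact List.mem_append.mpr (Or.inr hy)

-- the run scan of B computes "some element has count 3 / count 2" on any sorted list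
theorem runScan_sorted (s : List Int) (h3 h2 : Bool) (hs : s.Pairwise (· ≤ ·)) :
    runScan s h3 h2
    = ((h3 || s.any (fun x => s.count x == 3)) &&
       (h2 || s.any (fun x => s.count x == 2))) := by
  revert hs
  induction s, h3, h2 using runScan.induct with
  | case1 h3 h2 => intro _; simp [runScan]
  | case2 x rest h3 h2 run ih =>
    intro hs
    have hpw : rest.Pairwise (· ≤ ·) := (List.pairwise_cons.mp hs).2
    have hd : (rest.dropWhile (· == x)).Pairwise (· ≤ ·) :=
      hpw.sublist (List.dropWhile_sublist (· == x))
    rw [runScan, ih hd, any_count_split x rest hs 3, any_count_split x rest hs 2]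
    simp only [run]
    cases h3 <;> cases h2 <;> simp

theorem check_three_and_two_spec : Claim_equal_check_three_and_two := by
  intro array _
  unfold Spec_check_three_and_two check_three_and_two check_three_and_two_alt
  have hperm := PySem.List.sorted_perm array (fun x => x) false
  have hpw : (PySem.List.sorted array (fun x => x) false).Pairwise (· ≤ ·) := by
    simpa using PySem.List.sorted_pairwise array (fun x => x)
  rw [runScan_sorted _ _ _ hpw, foldA]
  have hany : ∀ (k : Nat),
      ((PySem.List.sorted array (fun x => x) false).any
        (fun x => List.count x (PySem.List.sorted array (fun x => x) false) == k))
      = array.any (fun x => List.count x array == k) := by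
    intro k
    rw [Bool.eq_iff_iff]
    simp only [List.any_eq_true]
    constructor
    · rintro ⟨x, hx, hc⟩
      exact ⟨x, hperm.mem_iff.mp hx, by rwa [hperm.count_eq] at hc⟩
    · rintro ⟨x, hx, hc⟩
      exact ⟨x, hperm.mem_iff.mpr hx, by rwa [hperm.count_eq]⟩
  have hfun : (fun n => !(List.count n array == 3) && (List.count n array == 2))
            = (fun n => List.count n array == 2) := by
    funext n
    by_cases h : List.count n array = 2 <;> simp [h]
  simp only [PySem.List.count]
  simp only [hfun, hany 3, hany 2]
  cases array.any (fun x => List.count x array == 3) <;>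
    cases array.any (fun x => List.count x array == 2) <;> simp
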